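-- pv_equiv track=rewrite | github.com/greenantix/GMAILspambot | gmail_lm_cleaner.py | _cluster_by_sender_domain
-- ===== SOURCE A (Python) =====
-- def _cluster_by_sender_domain(emails):
--     """Cluster emails by sender domain."""
--     domain_clusters = {}
--
--     for email in emails:
--         sender = email['sender']
--         # Extract domain from email address
--         if '@' in sender:
--             domain = sender.split('@')[-1].strip()
--         else:
--             domain = sender
--
--         if domain not in domain_clusters:
--             domain_clusters[domain] = []
--         domain_clusters[domain].append(email)
--
--     # Filter out clusters that are too small
--     return {domain: emails for domain, emails in domain_clusters.items() if len(emails) >= 3}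
-- ===== SOURCE B (Python) =====
-- def _cluster_by_sender_domain(emails):
--     """Cluster emails by sender domain: dedup the domains in first-seen order,
--     then make one filtered scan over emails per distinct domain, keeping the
--     groups of size >= 3; no grouping dict is maintained during the scan."""
--     def _domain(e):
--         s = e['sender']
--         return s.split('@')[-1].strip() if '@' in s else s
--
--     keys = list(dict.fromkeys(_domain(e) for e in emails))
--     pairs = []
--     for k in keys:
--         group = [e for e in emails if _domain(e) == k]
--         if len(group) >= 3:
--             pairs.append((k, group))
--     return dict(pairs)
-- ===== Notes on version B (the rewrite author's own statement) =====
-- stated objective: alternative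
-- what changed: A makes one pass maintaining a dict of growing per-domain lists and filters the finished dict by size; B maintains no grouping structure at all: it first dedups the domain keys in first-seen order, then for each distinct domain rescans the email list to materialize that one group, keeping it only if its length >= 3 (repeated-scan O(n*k) instead of A's single-pass O(n) hash grouping).
import Mathlib
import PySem

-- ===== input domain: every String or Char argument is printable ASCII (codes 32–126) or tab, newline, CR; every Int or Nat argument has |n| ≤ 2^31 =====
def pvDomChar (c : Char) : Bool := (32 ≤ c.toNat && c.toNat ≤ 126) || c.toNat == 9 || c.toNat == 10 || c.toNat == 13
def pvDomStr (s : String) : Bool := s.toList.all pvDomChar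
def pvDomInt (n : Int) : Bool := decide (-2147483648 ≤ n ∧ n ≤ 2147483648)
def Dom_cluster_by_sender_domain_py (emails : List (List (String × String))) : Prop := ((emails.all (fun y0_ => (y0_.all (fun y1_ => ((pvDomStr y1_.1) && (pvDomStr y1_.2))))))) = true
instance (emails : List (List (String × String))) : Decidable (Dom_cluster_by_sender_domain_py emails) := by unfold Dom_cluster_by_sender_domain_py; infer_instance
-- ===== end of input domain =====

-- B keeps no grouping dict: it dedups the domain keys in first-seen order, then rescans the email
-- list once per distinct domain, keeping the groups of size >= 3; same return value wherever A returns.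

-- ===== PORT A =====
-- email['sender']  (KeyError when the key is absent — excluded by Pre_; dict built from pairs: last value wins)
def pvSenderA (email : List (String × String)) : String :=
  (PySem.Dict.ofList email).getD "sender" ""

-- '@' in sender ? sender.split('@')[-1].strip() : sender   ([-1] never raises: a split result is nonempty)
def pvGetDomainA (sender : String) : String :=
  if PySem.Str.isIn "@" sender then
    PySem.Str.strip (PySem.List.pyGetD ((PySem.Str.split? sender "@").getD []) (-1) "")
  else sender

def cluster_by_sender_domain_py (emails : List (List (String × String))) : List (String × List (List (String × String))) :=
  let domain_clusters :=
    emails.foldl (fun d email =>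
      let sender := pvSenderA email
      let domain := pvGetDomainA sender
      -- if domain not in domain_clusters: domain_clusters[domain] = []
      let d := if d.contains domain then d else d.insert domain ([] : List (List (String × String)))
      -- domain_clusters[domain].append(email)
      d.modify domain [] (fun v => v ++ [email]))
      PySem.Dict.empty
  -- {domain: emails for domain, emails in domain_clusters.items() if len(emails) >= 3}
  domain_clusters.items.filter (fun p => decide (3 ≤ p.2.length))

-- ===== PORT B =====
-- B's helper _domain(email)  (same KeyError on a missing 'sender' key — excluded by Pre_)
def pvGetDomainB (email : List (String × String)) : String :=
  let sender := (PySem.Dict.ofList email).getD "sender" ""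
  if PySem.Str.isIn "@" sender then
    PySem.Str.strip (PySem.List.pyGetD ((PySem.Str.split? sender "@").getD []) (-1) "")
  else sender

def cluster_by_sender_domain_py_alt (emails : List (List (String × String))) : List (String × List (List (String × String))) :=
  -- keys = list(dict.fromkeys(_domain(e) for e in emails))
  let keys := PySem.List.dedup (emails.map (fun e => pvGetDomainB e))
  -- for k in keys: group = [e for e in emails if _domain(e) == k]; if len(group) >= 3: pairs.append((k, group))
  let pairs := keys.foldl (fun acc k =>
      let group := emails.filter (fun e => pvGetDomainB e == k)
      if 3 ≤ group.length then acc ++ [(k, group)] else acc) []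
  -- return dict(pairs)
  (PySem.Dict.ofList pairs).items

-- ===== PRECONDITION & SPEC =====
-- Pre_ excludes exactly the inputs containing an email without a 'sender' key, on which Python A raises KeyError.
def Pre_cluster_by_sender_domain_py (emails : List (List (String × String))) : Prop :=
  ∀ email ∈ emails, "sender" ∈ email.map (·.1)
instance (emails : List (List (String × String))) : Decidable (Pre_cluster_by_sender_domain_py emails) := by unfold Pre_cluster_by_sender_domain_py; infer_instance

def pvWitness_cluster_by_sender_domain_py : (List (List (String × String))) :=
  [[("sender", "a@x.com")], [("sender", "b@x.com")], [("sender", "c@ x.com ")], [("sender", "noat")]]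

def Spec_cluster_by_sender_domain_py (emails : List (List (String × String))) (out : List (String × List (List (String × String)))) : Prop := out = cluster_by_sender_domain_py_alt emails
instance (emails : List (List (String × String))) (out : List (String × List (List (String × String)))) : Decidable (Spec_cluster_by_sender_domain_py emails out) := by unfold Spec_cluster_by_sender_domain_py; infer_instance

-- ===== CLAIM (what is proved, stated in full; the proofs are below) =====
def Claim_equal_cluster_by_sender_domain_py : Prop := ∀ (emails : List (List (String × String))), Dom_cluster_by_sender_domain_py emails → Pre_cluster_by_sender_domain_py emails → Spec_cluster_by_sender_domain_py emails (cluster_by_sender_domain_py emails)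

-- ===== LEMMAS AND PROOFS =====
-- Both sides are reduced to a canonical form: the distinct domain keys in first-seen order,
-- filtered by "the domain's group has ≥ 3 emails", each mapped to its group.

-- the (domain, email) pairs, the domain keys, the "large cluster" predicate, and the group of a key
def pvKeyed (emails : List (List (String × String))) : List (String × List (String × String)) :=
  emails.map (fun e => (pvGetDomainB e, e))

def pvKs (emails : List (List (String × String))) : List String := emails.map pvGetDomainB

def pvQ (emails : List (List (String × String))) (k : String) : Bool :=
  decide (3 ≤ (pvKs emails).count k)

def pvGrp (emails : List (List (String × String))) (k : String) : List (List (String × String)) :=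
  ((pvKeyed emails).filter (fun p => p.1 == k)).map (·.2)

-- A's "if absent insert [] then append" is a plain modify-append
theorem pv_modify_insert_nil {κ ν : Type} [BEq κ] [LawfulBEq κ]
    (d : PySem.Dict κ (List ν)) (k : κ) (f : List ν → List ν) (h : d.contains k = false) :
    (d.insert k []).modify k [] f = d.modify k [] f := by
  simp [PySem.Dict.modify, PySem.Dict.getD_insert_self, PySem.Dict.insert_insert_self,
        PySem.Dict.getD_of_not_contains d [] h]

theorem pv_stepA_eq (d : PySem.Dict String (List (List (String × String)))) (k : String)
    (e : List (String × String)) :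
    (if d.contains k then d else d.insert k []).modify k [] (fun v => v ++ [e])
      = d.modify k [] (fun v => v ++ [e]) := by
  by_cases h : d.contains k = true
  · simp [h]
  · simp only [Bool.not_eq_true] at h
    simp [h, pv_modify_insert_nil d k _ h]

-- items of a modify-append grouping fold: ordered distinct keys, each paired with its group
theorem pv_group_items (l : List (String × List (String × String))) :
    (l.foldl (fun d p => d.modify p.1 [] (fun v => v ++ [p.2])) PySem.Dict.empty).items
      = (PySem.Set.ofList (l.map (·.1))).map
          (fun k => (k, (l.filter (fun p => p.1 == k)).map (·.2))) := by
  have hnd : (l.foldl (fun d p => d.modify p.1 [] (fun v => v ++ [p.2])) PySem.Dict.empty).keys.Nodup := by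
    refine PySem.Dict.nodup_keys_foldl_modify_key l (fun p => p.1) [] (fun _ p => fun v => v ++ [p.2]) _ ?_
    simp [PySem.Dict.keys_empty]
  rw [PySem.Dict.items_eq_map_keys _ hnd []]
  rw [PySem.Dict.keys_foldl_modify_key l (fun p => p.1) [] (fun _ p => fun v => v ++ [p.2])]
  rw [PySem.Dict.keys_empty, PySem.Set.update_nil_left]
  refine List.map_congr_left (fun k _ => ?_)
  rw [PySem.Dict.getD_foldl_modify_append l PySem.Dict.empty k, PySem.Dict.getD_empty]
  simp

theorem pv_grp_len (emails : List (List (String × String))) (k : String) :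
    (pvGrp emails k).length = (pvKs emails).count k := by
  unfold pvGrp pvKs pvKeyed
  rw [List.length_map, ← List.countP_eq_length_filter, List.count_eq_countP,
      List.countP_map, List.countP_map]
  rfl

-- the group of a key is the filtered email list (B's per-key scan)
theorem pv_grp_eq (emails : List (List (String × String))) (k : String) :
    pvGrp emails k = emails.filter (fun e => pvGetDomainB e == k) := by
  unfold pvGrp pvKeyed
  rw [List.filter_map, List.map_map]
  simp only [Function.comp_def]
  rw [List.map_id']

-- A reduces to the canonical form
theorem pv_A_eq (emails : List (List (String × String))) :
    cluster_by_sender_domain_py emails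
      = ((PySem.Set.ofList (pvKs emails)).filter (pvQ emails)).map (fun k => (k, pvGrp emails k)) := by
  have key : cluster_by_sender_domain_py emails
      = (List.foldl (fun d e => d.modify (pvGetDomainB e) [] (fun v => v ++ [e]))
          PySem.Dict.empty emails).items.filter (fun p => decide (3 ≤ p.2.length)) := by
    show (List.foldl (fun d e =>
        (if d.contains (pvGetDomainB e) then d else d.insert (pvGetDomainB e) []).modify (pvGetDomainB e) []
          (fun v => v ++ [e])) PySem.Dict.empty emails).items.filter (fun p => decide (3 ≤ p.2.length)) = _
    rw [show (fun (d : PySem.Dict String (List (List (String × String)))) (e : List (String × String)) =>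
        (if d.contains (pvGetDomainB e) then d else d.insert (pvGetDomainB e) []).modify (pvGetDomainB e) []
          (fun v => v ++ [e]))
      = (fun d e => d.modify (pvGetDomainB e) [] (fun v => v ++ [e]))
      from funext fun d => funext fun e => pv_stepA_eq d _ e]
  rw [key,
    show List.foldl (fun d e => d.modify (pvGetDomainB e) [] (fun v => v ++ [e])) PySem.Dict.empty emails
      = List.foldl (fun d p => d.modify p.1 [] (fun v => v ++ [p.2])) PySem.Dict.empty (pvKeyed emails)
    by unfold pvKeyed
       exact (List.foldl_map (f := fun e => (pvGetDomainB e, e))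
         (g := fun d p => d.modify p.1 [] (fun v => v ++ [p.2]))
         (l := emails) (init := PySem.Dict.empty)).symm,
    pv_group_items, List.filter_map,
    show (pvKeyed emails).map (·.1) = pvKs emails by unfold pvKeyed pvKs; simp]
  congr 1
  refine List.filter_congr (fun k _ => ?_)
  have h := pv_grp_len emails k
  unfold pvGrp at h
  simp only [Function.comp, pvQ, h]

-- B reduces to the same canonical form
theorem pv_B_eq (emails : List (List (String × String))) :
    cluster_by_sender_domain_py_alt emails
      = ((PySem.Set.ofList (pvKs emails)).filter (pvQ emails)).map (fun k => (k, pvGrp emails k)) := by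
  show (PySem.Dict.ofList
      ((PySem.List.dedup (emails.map (fun e => pvGetDomainB e))).foldl (fun acc k =>
        if 3 ≤ (emails.filter (fun e => pvGetDomainB e == k)).length
        then acc ++ [(k, emails.filter (fun e => pvGetDomainB e == k))] else acc) [])).items = _
  have hks : emails.map (fun e => pvGetDomainB e) = pvKs emails := rfl
  -- the loop is a filter-and-map over the deduped keys
  have hpairs : (PySem.List.dedup (emails.map (fun e => pvGetDomainB e))).foldl (fun acc k =>
        if 3 ≤ (emails.filter (fun e => pvGetDomainB e == k)).length
        then acc ++ [(k, emails.filter (fun e => pvGetDomainB e == k))] else acc) []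
      = ((PySem.Set.ofList (pvKs emails)).filter (pvQ emails)).map (fun k => (k, pvGrp emails k)) := by
    rw [show (fun (acc : List (String × List (List (String × String)))) (k : String) =>
          if 3 ≤ (emails.filter (fun e => pvGetDomainB e == k)).length
          then acc ++ [(k, emails.filter (fun e => pvGetDomainB e == k))] else acc)
        = (fun acc k => if pvQ emails k
          then acc ++ [(k, emails.filter (fun e => pvGetDomainB e == k))] else acc) from by
      funext acc k
      have h : (emails.filter (fun e => pvGetDomainB e == k)).length = (pvKs emails).count k := by
        rw [← pv_grp_eq, pv_grp_len]
      by_cases hq : 3 ≤ (pvKs emails).count k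
      · rw [if_pos (by omega), if_pos (by simp [pvQ, hq])]
      · rw [if_neg (by omega), if_neg (by simp [pvQ, hq])]]
    rw [PySem.List.foldl_append_if (pvQ emails)
        (fun k => (k, emails.filter (fun e => pvGetDomainB e == k)))]
    rw [hks, PySem.List.dedup_eq_ofList, List.nil_append]
    exact List.map_congr_left fun k _ => by rw [pv_grp_eq]
  rw [hpairs]
  -- dict(pairs) over distinct keys: items = pairs
  have hnd : ((PySem.Set.ofList (pvKs emails)).filter (pvQ emails)).Nodup :=
    (PySem.Set.nodup_ofList (pvKs emails)).filter _
  rw [show PySem.Dict.ofList (((PySem.Set.ofList (pvKs emails)).filter (pvQ emails)).map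
        (fun k => (k, pvGrp emails k)))
      = (((PySem.Set.ofList (pvKs emails)).filter (pvQ emails)).map
          (fun k => (k, pvGrp emails k))).foldl
          (fun d p => d.insert p.1 p.2) PySem.Dict.empty from rfl,
    List.foldl_map,
    PySem.Dict.items_foldl_insert_fresh _ (fun k => k) (fun k => pvGrp emails k) _
      (fun a _ => PySem.Dict.contains_empty a)
      (by simpa using hnd)]
  rfl

-- ===== VERDICT (by name: the statement is the Claim_ definition above) =====
theorem cluster_by_sender_domain_py_spec : Claim_equal_cluster_by_sender_domain_py := by
  intro emails _hdom _hpre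
  unfold Spec_cluster_by_sender_domain_py
  rw [pv_A_eq, pv_B_eq]
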